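-- pv_equiv track=rewrite | github.com/ShohimardonDev/VideoChunkMaster | video_chunk_master.py | process_current_section
-- ===== SOURCE A (Python) =====
-- def process_current_section(current_section, accumulated_words, split_index):
--     blocks_to_keep = []
--     remaining_blocks = []
--     current_block_words = []
--
--     for b in current_section:
--         block_words = b[2].split()
--         current_block_words.extend(block_words)
--
--         if len(current_block_words) <= split_index:
--             blocks_to_keep.append(b)
--         else:
--             remaining_words = len(current_block_words) - split_index
--             if remaining_words > 0:
--                 new_text = " ".join(block_words[-remaining_words:])
--                 remaining_blocks.append((b[0], b[1], new_text))
--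
--             modified_text = " ".join(block_words[:-remaining_words])
--             if modified_text:
--                 blocks_to_keep.append((b[0], b[1], modified_text))
--
--     return blocks_to_keep, remaining_blocks
-- ===== SOURCE B (Python) =====
-- def process_current_section(current_section, accumulated_words, split_index):
--     word_lists = [b[2].split() for b in current_section]
--     # find pivot: first block where cumulative word count exceeds split_index
--     total = 0
--     pivot = None
--     for i, ws in enumerate(word_lists):
--         if total + len(ws) > split_index:
--             pivot = i
--             break
--         total += len(ws)
--     if pivot is None:
--         return list(current_section), []
--     blocks_to_keep = list(current_section[:pivot])
--     b0, b1, _ = current_section[pivot]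
--     ws = word_lists[pivot]
--     off = max(split_index - total, 0)
--     head = " ".join(ws[:off])
--     if head:
--         blocks_to_keep.append((b0, b1, head))
--     remaining_blocks = [(b0, b1, " ".join(ws[off:]))]
--     for (c0, c1, _), ws2 in zip(current_section[pivot + 1:], word_lists[pivot + 1:]):
--         remaining_blocks.append((c0, c1, " ".join(ws2)))
--     return blocks_to_keep, remaining_blocks
-- ===== Notes on version B (the rewrite author's own statement) =====
-- stated objective: alternative
-- what changed: Replaces A's single fold that re-checks the growing cumulative word list at every block with a two-phase decomposition: locate the pivot block via prefix word counts, then assemble keep = prefix (+ non-empty head of the pivot) and remaining = pivot tail followed by all later blocks whitespace-normalized.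
import Mathlib
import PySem

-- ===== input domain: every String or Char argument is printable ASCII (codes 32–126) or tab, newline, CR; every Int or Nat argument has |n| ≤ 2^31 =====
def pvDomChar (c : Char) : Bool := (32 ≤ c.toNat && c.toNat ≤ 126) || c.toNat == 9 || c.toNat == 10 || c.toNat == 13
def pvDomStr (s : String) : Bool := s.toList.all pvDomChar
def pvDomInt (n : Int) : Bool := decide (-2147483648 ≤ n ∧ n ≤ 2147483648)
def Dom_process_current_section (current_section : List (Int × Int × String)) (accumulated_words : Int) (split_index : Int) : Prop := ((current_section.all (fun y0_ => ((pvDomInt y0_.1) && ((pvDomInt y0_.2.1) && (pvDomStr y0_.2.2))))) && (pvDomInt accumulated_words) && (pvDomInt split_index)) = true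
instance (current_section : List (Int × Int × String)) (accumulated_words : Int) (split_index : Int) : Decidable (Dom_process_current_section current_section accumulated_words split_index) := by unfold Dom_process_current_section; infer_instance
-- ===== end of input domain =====

-- B locates the pivot block by prefix word counts and assembles both output lists by
-- slicing around it, instead of A's single fold that re-examines the cumulative word
-- list at every block (objective: simpler decomposition; same return value).

-- ===== PORT A =====
-- one loop iteration of A's for-loop; state = (blocks_to_keep, remaining_blocks, current_block_words)
def pcsStepA (split_index : Int)
    (st : List (Int × Int × String) × List (Int × Int × String) × List String)
    (b : Int × Int × String) :
    List (Int × Int × String) × List (Int × Int × String) × List String :=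
  let block_words := PySem.Str.split₀ b.2.2
  let cbw := st.2.2 ++ block_words
  if (cbw.length : Int) ≤ split_index then
    (st.1 ++ [b], st.2.1, cbw)
  else
    let remaining_words : Int := (cbw.length : Int) - split_index
    let rem :=
      if remaining_words > 0 then
        st.2.1 ++ [(b.1, b.2.1, PySem.Str.join " " (PySem.List.slice block_words (some (-remaining_words)) none))]
      else st.2.1
    let modified_text := PySem.Str.join " " (PySem.List.slice block_words none (some (-remaining_words)))
    let keep := if modified_text ≠ "" then st.1 ++ [(b.1, b.2.1, modified_text)] else st.1
    (keep, rem, cbw)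

def process_current_section (current_section : List (Int × Int × String)) (accumulated_words : Int) (split_index : Int) : (List (Int × Int × String)) × (List (Int × Int × String)) :=
  let st := current_section.foldl (pcsStepA split_index) ([], [], [])
  (st.1, st.2.1)

-- ===== PORT B =====
-- Source B's pivot search: first index whose block pushes the running total above split_index,
-- returned together with the total before it
def pcsFindPivot (split_index : Int) : List (List String) → Int → Option (Nat × Int)
  | [], _ => none
  | ws :: rest, total =>
    if total + (ws.length : Int) > split_index then some (0, total)
    else (pcsFindPivot split_index rest (total + (ws.length : Int))).map (fun p => (p.1 + 1, p.2))

def process_current_section_alt (current_section : List (Int × Int × String)) (accumulated_words : Int) (split_index : Int) : (List (Int × Int × String)) × (List (Int × Int × String)) :=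
  let word_lists := current_section.map (fun b => PySem.Str.split₀ b.2.2)
  match pcsFindPivot split_index word_lists 0 with
  | none => (current_section, [])
  | some (pivot, total) =>
    let b := current_section.getD pivot (0, 0, "")
    let ws := word_lists.getD pivot []
    let off := (max (split_index - total) 0).toNat
    let head := PySem.Str.join " " (ws.take off)
    let blocks_to_keep :=
      if head ≠ "" then current_section.take pivot ++ [(b.1, b.2.1, head)]
      else current_section.take pivot
    let remaining_blocks :=
      (b.1, b.2.1, PySem.Str.join " " (ws.drop off)) ::
        ((current_section.drop (pivot + 1)).zip (word_lists.drop (pivot + 1))).map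
          (fun p => (p.1.1, p.1.2.1, PySem.Str.join " " p.2))
    (blocks_to_keep, remaining_blocks)

-- ===== PRECONDITION & SPEC =====
def Spec_process_current_section (current_section : List (Int × Int × String)) (accumulated_words : Int) (split_index : Int) (out : (List (Int × Int × String)) × (List (Int × Int × String))) : Prop := out = process_current_section_alt current_section accumulated_words split_index
instance (current_section : List (Int × Int × String)) (accumulated_words : Int) (split_index : Int) (out : (List (Int × Int × String)) × (List (Int × Int × String))) : Decidable (Spec_process_current_section current_section accumulated_words split_index out) := by unfold Spec_process_current_section; infer_instance

-- ===== CLAIM (what is proved, stated in full; the proofs are below) =====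
def Claim_equal_process_current_section : Prop := ∀ (current_section : List (Int × Int × String)) (accumulated_words : Int) (split_index : Int), Dom_process_current_section current_section accumulated_words split_index → Spec_process_current_section current_section accumulated_words split_index (process_current_section current_section accumulated_words split_index)

-- ===== LEMMAS AND PROOFS =====

-- A's step when the cumulative count stays within split_index: the block is kept verbatim
lemma pcsStepA_keep (si : Int) (keep rem : List (Int × Int × String)) (cbw : List String)
    (b : Int × Int × String)
    (h : (cbw.length : Int) + ((PySem.Str.split₀ b.2.2).length : Int) ≤ si) :
    pcsStepA si (keep, rem, cbw) b = (keep ++ [b], rem, cbw ++ PySem.Str.split₀ b.2.2) := by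
  simp only [pcsStepA]
  rw [if_pos (by simp; omega)]

-- A's step when the cumulative count crosses split_index, rewritten in B's take/drop form
lemma pcsStepA_cross (si : Int) (keep rem : List (Int × Int × String)) (cbw : List String)
    (b : Int × Int × String)
    (h : (cbw.length : Int) + ((PySem.Str.split₀ b.2.2).length : Int) > si) :
    pcsStepA si (keep, rem, cbw) b =
      ((if PySem.Str.join " " ((PySem.Str.split₀ b.2.2).take ((max (si - (cbw.length : Int)) 0).toNat)) ≠ "" then
          keep ++ [(b.1, b.2.1, PySem.Str.join " " ((PySem.Str.split₀ b.2.2).take ((max (si - (cbw.length : Int)) 0).toNat)))]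
        else keep),
       rem ++ [(b.1, b.2.1, PySem.Str.join " " ((PySem.Str.split₀ b.2.2).drop ((max (si - (cbw.length : Int)) 0).toNat)))],
       cbw ++ PySem.Str.split₀ b.2.2) := by
  simp only [pcsStepA]
  set ws := PySem.Str.split₀ b.2.2 with hws
  have hlen : ((cbw ++ ws).length : Int) = (cbw.length : Int) + (ws.length : Int) := by
    simp
  rw [if_neg (by omega)]
  set r : Int := ((cbw ++ ws).length : Int) - si with hr
  have hrpos : 0 < r := by omega
  have hrnat : r = ((r.toNat : Nat) : Int) := by omega
  have hoff : ws.length - r.toNat = (max (si - (cbw.length : Int)) 0).toNat := by omega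
  rw [if_pos hrpos]
  rw [hrnat, PySem.List.slice_from_neg_natCast ws (k := r.toNat) (by omega),
      PySem.List.slice_to_neg_natCast ws (k := r.toNat) (by omega), hoff]

-- after the pivot the cumulative count stays above split_index: every block goes whole,
-- whitespace-normalized, to remaining_blocks
lemma pcsFold_post (si : Int) (l : List (Int × Int × String)) :
    ∀ (keep rem : List (Int × Int × String)) (cbw : List String),
    (cbw.length : Int) > si →
    ((l.foldl (pcsStepA si) (keep, rem, cbw)).1 = keep ∧
     (l.foldl (pcsStepA si) (keep, rem, cbw)).2.1 =
       rem ++ l.map (fun b => (b.1, b.2.1, PySem.Str.join " " (PySem.Str.split₀ b.2.2)))) := by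
  induction l with
  | nil => intro keep rem cbw h; simp
  | cons b rest ih =>
    intro keep rem cbw h
    have hcross : (cbw.length : Int) + ((PySem.Str.split₀ b.2.2).length : Int) > si := by
      have : (0 : Int) ≤ ((PySem.Str.split₀ b.2.2).length : Int) := by positivity
      omega
    have hoff : (max (si - (cbw.length : Int)) 0).toNat = 0 := by omega
    simp only [List.foldl_cons, pcsStepA_cross si keep rem cbw b hcross, hoff]
    simp only [List.take_zero, List.drop_zero, PySem.Chars.join, PySem.Str.join]
    have := ih keep (rem ++ [(b.1, b.2.1, PySem.Str.join " " (PySem.Str.split₀ b.2.2))])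
      (cbw ++ PySem.Str.split₀ b.2.2) (by simp; omega)
    simp only [PySem.Str.join] at this
    simpa using this

-- zipping a list with its own map and projecting is a plain map
lemma zip_map_self_map {α β γ : Type} (l : List α) (g : α → β) (f : α × β → γ) :
    (l.zip (l.map g)).map f = l.map (fun x => f (x, g x)) := by
  induction l with
  | nil => rfl
  | cons x xs ih => simp [ih]

-- the main invariant: A's fold from any phase-1 state equals B's pivot-based assembly
lemma pcsFold_main (si : Int) (l : List (Int × Int × String)) :
    ∀ (keep : List (Int × Int × String)) (cbw : List String),
    ((l.foldl (pcsStepA si) (keep, [], cbw)).1,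
     (l.foldl (pcsStepA si) (keep, [], cbw)).2.1) =
      (match pcsFindPivot si (l.map (fun b => PySem.Str.split₀ b.2.2)) (cbw.length : Int) with
       | none => (keep ++ l, [])
       | some (pivot, total) =>
         let b := l.getD pivot (0, 0, "")
         let ws := (l.map (fun b => PySem.Str.split₀ b.2.2)).getD pivot []
         let off := (max (si - total) 0).toNat
         let head := PySem.Str.join " " (ws.take off)
         ((if head ≠ "" then keep ++ l.take pivot ++ [(b.1, b.2.1, head)]
           else keep ++ l.take pivot),
          (b.1, b.2.1, PySem.Str.join " " (ws.drop off)) ::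
            ((l.drop (pivot + 1)).zip ((l.map (fun b => PySem.Str.split₀ b.2.2)).drop (pivot + 1))).map
              (fun p => (p.1.1, p.1.2.1, PySem.Str.join " " p.2))) ) := by
  induction l with
  | nil => intro keep cbw; simp [pcsFindPivot]
  | cons b rest ih =>
    intro keep cbw
    by_cases h : (cbw.length : Int) + ((PySem.Str.split₀ b.2.2).length : Int) > si
    · -- b is the pivot block
      simp only [List.map_cons, pcsFindPivot]
      rw [if_pos h]
      simp only [List.foldl_cons, pcsStepA_cross si keep [] cbw b h]
      have hpost := pcsFold_post si rest
        (if PySem.Str.join " " ((PySem.Str.split₀ b.2.2).take ((max (si - (cbw.length : Int)) 0).toNat)) ≠ "" then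
           keep ++ [(b.1, b.2.1, PySem.Str.join " " ((PySem.Str.split₀ b.2.2).take ((max (si - (cbw.length : Int)) 0).toNat)))]
         else keep)
        ([(b.1, b.2.1, PySem.Str.join " " ((PySem.Str.split₀ b.2.2).drop ((max (si - (cbw.length : Int)) 0).toNat)))])
        (cbw ++ PySem.Str.split₀ b.2.2) (by simp; omega)
      simp only [List.nil_append]
      simp only [hpost.1, hpost.2]
      simp [zip_map_self_map]
    · -- b is wholly kept; recurse
      simp only [List.map_cons, pcsFindPivot]
      rw [if_neg (by omega)]
      simp only [List.foldl_cons, pcsStepA_keep si keep [] cbw b (by omega)]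
      have := ih (keep ++ [b]) (cbw ++ PySem.Str.split₀ b.2.2)
      have hlen : (((cbw ++ PySem.Str.split₀ b.2.2).length : Nat) : Int)
          = (cbw.length : Int) + ((PySem.Str.split₀ b.2.2).length : Int) := by simp
      rw [hlen] at this
      rw [this]
      cases hp : pcsFindPivot si (rest.map (fun b => PySem.Str.split₀ b.2.2))
          ((cbw.length : Int) + ((PySem.Str.split₀ b.2.2).length : Int)) with
      | none => simp
      | some p =>
        obtain ⟨pivot, total⟩ := p
        simp [List.take_succ_cons]

-- ===== VERDICT (by name: the statement is the Claim_ definition above) =====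
theorem process_current_section_spec : Claim_equal_process_current_section := by
  intro current_section accumulated_words split_index _
  unfold Spec_process_current_section process_current_section process_current_section_alt
  have h := pcsFold_main split_index current_section [] []
  simp only [List.length_nil, Nat.cast_zero] at h
  cases hp : pcsFindPivot split_index
      (current_section.map (fun b => PySem.Str.split₀ b.2.2)) 0 with
  | none =>
    rw [hp] at h
    simp only [hp]
    simpa using h
  | some p =>
    obtain ⟨pivot, total⟩ := p
    rw [hp] at h
    simp only [hp]
    simp only [List.nil_append] at h
    rw [Prod.ext_iff] at h ⊢
    constructor
    · exact h.1.trans (by split_ifs <;> simp)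
    · exact h.2
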